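-- pv_equiv track=rewrite | github.com/shaystevens/COSC343-Wordle-AI | cosc343_wordle/my_agent_copy.py | mostUniqueWord
-- ===== SOURCE A (Python) =====
-- def checkMultipleLetters(word):
--    for letter in word:
--       if word.count(letter) > 1:
--          return True
--    return False
--
-- def mostUniqueWord(dictionary, correct_letters, partial_letters):
--    words_score = {}
--
--    for word in dictionary:
--       score = 0
--       for letter in correct_letters:
--          if word.count(letter) > 0:
--             score += word.count(letter)
--
--       for letter in partial_letters:
--          if word.count(letter) > 0 and letter not in correct_letters:
--             score += word.count(letter)
--
--       words_score.update({word: score})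
--
--    unique_word = min(words_score, key=lambda k: words_score[k])
--
--    while checkMultipleLetters(unique_word) and len(words_score) > 1:
--       del words_score[unique_word]
--       unique_word = min(words_score, key=lambda k: words_score[k])
--
--    return unique_word
-- ===== SOURCE B (Python) =====
-- def mostUniqueWord(dictionary, correct_letters, partial_letters):
--     cset = set(correct_letters)
--     def score(w):
--         s = 0
--         for l in correct_letters:
--             s += w.count(l)
--         for l in partial_letters:
--             if l not in cset:
--                 s += w.count(l)
--         return s
--     ranked = sorted(dict.fromkeys(dictionary), key=score)
--     for w in ranked:
--         if len(set(w)) == len(w):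
--             return w
--     return ranked[-1]
-- ===== Notes on version B (the rewrite author's own statement) =====
-- stated objective: faster
-- what changed: A rebuilds the minimum of the whole score dict after every deletion of a repeated-letter word (quadratic in the dictionary); B scores each distinct word once, stably sorts by score and scans that order once for the first all-distinct-letters word, falling back to the last ranked word.
import Mathlib
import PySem

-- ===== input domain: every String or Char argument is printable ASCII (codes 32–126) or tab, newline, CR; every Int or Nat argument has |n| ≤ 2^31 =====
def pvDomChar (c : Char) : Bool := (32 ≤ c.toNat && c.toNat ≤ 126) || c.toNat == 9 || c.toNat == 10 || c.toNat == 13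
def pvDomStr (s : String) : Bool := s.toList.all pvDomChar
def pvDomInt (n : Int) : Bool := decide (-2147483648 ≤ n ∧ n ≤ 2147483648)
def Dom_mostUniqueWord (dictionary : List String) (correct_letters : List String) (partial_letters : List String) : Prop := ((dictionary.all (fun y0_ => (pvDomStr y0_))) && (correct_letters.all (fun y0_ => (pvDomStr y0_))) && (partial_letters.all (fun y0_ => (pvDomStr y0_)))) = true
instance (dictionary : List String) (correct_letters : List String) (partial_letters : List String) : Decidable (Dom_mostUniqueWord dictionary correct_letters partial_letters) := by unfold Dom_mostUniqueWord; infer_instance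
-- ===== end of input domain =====

-- B replaces A's repeated delete-min-and-rescan of the score dict by scoring each distinct
-- word once, one stable sort by score, and a single scan for the first word whose letters
-- are all distinct (falling back to the last ranked word).

-- ===== PORT A =====
def checkMultipleLettersAux (w : List Char) : List Char → Bool
  | [] => false
  | c :: rest => if w.count c > 1 then true else checkMultipleLettersAux w rest

def checkMultipleLetters (word : String) : Bool :=
  checkMultipleLettersAux word.toList word.toList

def pyScoreA (word : String) (correct_letters partial_letters : List String) : Int :=
  let score : Int := correct_letters.foldl (fun score letter =>
      if PySem.Str.count word letter > 0 then score + (PySem.Str.count word letter : Int) else score) 0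
  partial_letters.foldl (fun score letter =>
      if PySem.Str.count word letter > 0 && !(correct_letters.contains letter) then
        score + (PySem.Str.count word letter : Int) else score) score

-- the `while checkMultipleLetters(...) and len(...) > 1` loop; fuel = dict size bounds the deletions
def pyLoopA (fuel : Nat) (ws : PySem.Dict String Int) (u : String) : String :=
  match fuel with
  | 0 => u
  | fuel + 1 =>
    if checkMultipleLetters u && decide (ws.size > 1) then
      let ws' := ws.erase u
      match PySem.List.min? ws'.keys (fun k => ws'.getD k 0) with
      | some u' => pyLoopA fuel ws' u'
      | none => u
    else u

def mostUniqueWord (dictionary : List String) (correct_letters : List String) (partial_letters : List String) : String :=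
  let ws := dictionary.foldl
    (fun d word => d.insert word (pyScoreA word correct_letters partial_letters)) PySem.Dict.empty
  match PySem.List.min? ws.keys (fun k => ws.getD k 0) with
  | some u => pyLoopA ws.size ws u
  | none => ""   -- Python: min() of an empty dict raises ValueError; excluded by Pre_

-- ===== PORT B =====
def scoreB (correct_letters partial_letters : List String) (cset : PySem.Set String) (w : String) : Int :=
  let s : Int := correct_letters.foldl (fun s l => s + (PySem.Str.count w l : Int)) 0
  partial_letters.foldl (fun s l =>
    if !(PySem.Set.contains cset l) then s + (PySem.Str.count w l : Int) else s) s

def allUnique (w : String) : Bool :=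
  (PySem.Set.ofList w.toList).length == w.toList.length

def mostUniqueWord_alt (dictionary : List String) (correct_letters : List String) (partial_letters : List String) : String :=
  let cset := PySem.Set.ofList correct_letters
  let ranked := PySem.List.sorted (PySem.List.dedup dictionary) (scoreB correct_letters partial_letters cset) false
  match ranked.find? allUnique with
  | some w => w
  | none => ranked.getLast?.getD ""   -- ranked[-1]; IndexError on empty, excluded by Pre_

-- ===== PRECONDITION & SPEC =====
-- Pre_ excludes only the empty dictionary, on which A raises ValueError (min() of an empty sequence).
def Pre_mostUniqueWord (dictionary : List String) (correct_letters : List String) (partial_letters : List String) : Prop :=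
  dictionary ≠ []
instance (dictionary : List String) (correct_letters : List String) (partial_letters : List String) : Decidable (Pre_mostUniqueWord dictionary correct_letters partial_letters) := by unfold Pre_mostUniqueWord; infer_instance
def pvWitness_mostUniqueWord : List String × List String × List String := (["moon", "rate"], ["a"], ["o", "e"])

def Spec_mostUniqueWord (dictionary : List String) (correct_letters : List String) (partial_letters : List String) (out : String) : Prop := out = mostUniqueWord_alt dictionary correct_letters partial_letters
instance (dictionary : List String) (correct_letters : List String) (partial_letters : List String) (out : String) : Decidable (Spec_mostUniqueWord dictionary correct_letters partial_letters out) := by unfold Spec_mostUniqueWord; infer_instance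

-- ===== CLAIM (what is proved, stated in full; the proofs are below) =====
def Claim_equal_mostUniqueWord : Prop := ∀ (dictionary : List String) (correct_letters : List String) (partial_letters : List String), Dom_mostUniqueWord dictionary correct_letters partial_letters → Pre_mostUniqueWord dictionary correct_letters partial_letters → Spec_mostUniqueWord dictionary correct_letters partial_letters (mostUniqueWord dictionary correct_letters partial_letters)

-- ===== LEMMAS AND PROOFS =====

-- ---- the two score computations agree ----
theorem contains_ofList (cl : List String) (l : String) :
    PySem.Set.contains (PySem.Set.ofList cl) l = cl.contains l := by
  unfold PySem.Set.contains
  by_cases h : l ∈ cl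
  · simp [h, (PySem.Set.mem_ofList cl l).mpr h]
  · simp [h]

theorem scoreA_eq_scoreB (w : String) (cl pl : List String) :
    pyScoreA w cl pl = scoreB cl pl (PySem.Set.ofList cl) w := by
  unfold pyScoreA scoreB
  rw [List.foldl_ext
        (fun (s : Int) (letter : String) =>
          if PySem.Str.count w letter > 0 then s + (PySem.Str.count w letter : Int) else s)
        (fun (s : Int) (letter : String) => s + (PySem.Str.count w letter : Int)) 0
        (by intro s l _; simp)]
  apply List.foldl_ext
  intro s l _
  rw [contains_ofList]
  by_cases hc : l ∈ cl
  · simp [hc]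
  · simp [hc]

-- ---- the two repeated-letter tests agree ----
theorem ofList_sublist {α : Type} [BEq α] [LawfulBEq α] (l : List α) :
    (PySem.Set.ofList l).Sublist l := by
  induction l with
  | nil => simp [PySem.Set.ofList, PySem.Set.empty]
  | cons x t ih =>
    rw [PySem.Set.ofList_cons]
    have h1 : ((PySem.Set.ofList t).discard x).Sublist (PySem.Set.ofList t) := by
      unfold PySem.Set.discard; exact List.filter_sublist
    exact List.Sublist.cons₂ x (h1.trans ih)

theorem length_ofList_eq_iff {α : Type} [BEq α] [LawfulBEq α] (l : List α) :
    (PySem.Set.ofList l).length = l.length ↔ l.Nodup := by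
  constructor
  · intro h
    rw [← (ofList_sublist l).eq_of_length h]
    exact PySem.Set.nodup_ofList l
  · intro h
    rw [PySem.Set.ofList_eq_self_of_nodup _ h]

theorem checkAux_any (w : List Char) : ∀ l, checkMultipleLettersAux w l = l.any (fun c => w.count c > 1) := by
  intro l
  induction l with
  | nil => rfl
  | cons c rest ih =>
    simp only [checkMultipleLettersAux, List.any_cons, ← ih]
    by_cases h : w.count c > 1 <;> simp [h]

theorem check_eq_not_allUnique (l : List Char) :
    l.any (fun c => l.count c > 1) = !((PySem.Set.ofList l).length == l.length) := by
  by_cases h : l.Nodup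
  · have h1 : l.any (fun c => l.count c > 1) = false := by
      simp only [List.any_eq_false]
      intro c _
      have := List.nodup_iff_count_le_one.mp h c
      simp; omega
    have h2 : (PySem.Set.ofList l).length = l.length := (length_ofList_eq_iff l).mpr h
    simp [h1, h2]
  · have h1 : l.any (fun c => l.count c > 1) = true := by
      rw [List.any_eq_true]
      rcases not_forall.mp (fun hc => h (List.nodup_iff_count_le_one.mpr hc)) with ⟨c, hc⟩
      have hc2 : 1 < l.count c := by omega
      exact ⟨c, List.count_pos_iff.mp (by omega), by simpa using hc2⟩
    have h2 : (PySem.Set.ofList l).length ≠ l.length := fun he => h ((length_ofList_eq_iff l).mp he)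
    simp [h1, h2]

theorem check_allUnique (w : String) : checkMultipleLetters w = !allUnique w := by
  rw [checkMultipleLetters, checkAux_any, check_eq_not_allUnique]
  rfl

-- ---- min? as an explicit running fold ----
def minFold (F : String → Int) : Option String → List String → Option String
  | acc, [] => acc
  | none, x :: t => minFold F (some x) t
  | some m, x :: t => minFold F (if F x < F m then some x else some m) t

theorem foldl_minlike (F : String → Int) (step : Option String → String → Option String)
    (hnone : ∀ x, step none x = some x)
    (hsome : ∀ m x, step (some m) x = if F x < F m then some x else some m) :
    ∀ (t : List String) (acc : Option String), List.foldl step acc t = minFold F acc t := by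
  intro t
  induction t with
  | nil => intro acc; cases acc <;> simp [minFold]
  | cons x t ih =>
    intro acc
    cases acc with
    | none => simp [List.foldl_cons, hnone, minFold, ih]
    | some m => simp [List.foldl_cons, hsome, minFold, ih]

theorem min?_eq_minFold (F : String → Int) (t : List String) :
    PySem.List.min? t F = minFold F none t := by
  unfold PySem.List.min?
  exact foldl_minlike F _ (fun x => rfl) (fun m x => rfl) t none

theorem minFold_append_singleton (F : String → Int) :
    ∀ (t : List String) (acc : Option String) (x : String),
    minFold F acc (t ++ [x]) = match minFold F acc t with
      | none => some x
      | some m => if F x < F m then some x else some m := by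
  intro t
  induction t with
  | nil => intro acc x; cases acc <;> simp [minFold]
  | cons y t ih =>
    intro acc x
    cases acc with
    | none => simp only [List.cons_append, minFold, ih]
    | some m => simp only [List.cons_append, minFold, ih]

theorem min?_append_singleton (F : String → Int) (t : List String) (x : String) :
    PySem.List.min? (t ++ [x]) F = some (match PySem.List.min? t F with
      | none => x
      | some m => if F x < F m then x else m) := by
  rw [min?_eq_minFold, min?_eq_minFold, minFold_append_singleton]
  cases h : minFold F none t with
  | none => rfl
  | some m => simp only; split <;> rfl

theorem minFold_congr (F G : String → Int) :
    ∀ (t : List String), (∀ x ∈ t, F x = G x) →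
    ∀ (m : String), F m = G m → minFold F (some m) t = minFold G (some m) t := by
  intro t
  induction t with
  | nil => intros; rfl
  | cons x t ih =>
    intro h m hm
    have hx : F x = G x := h x (by simp)
    have ht : ∀ y ∈ t, F y = G y := fun y hy => h y (by simp [hy])
    simp only [minFold]
    rw [hx, hm]
    split
    · exact ih ht x hx
    · exact ih ht m hm

theorem min?_congr (F G : String → Int) (ks : List String)
    (h : ∀ x ∈ ks, F x = G x) : PySem.List.min? ks F = PySem.List.min? ks G := by
  rw [min?_eq_minFold, min?_eq_minFold]
  cases ks with
  | nil => rfl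
  | cons x t =>
    simp only [minFold]
    exact minFold_congr F G t (fun y hy => h y (by simp [hy])) x (h x (by simp))

-- ---- the stable sort starts with the first minimum ----
theorem sorted_append_singleton (f : String → Int) (ys : List String) (x : String) :
    PySem.List.sorted (ys ++ [x]) f false
      = PySem.List.insertBy (fun a b => decide (f a < f b)) x (PySem.List.sorted ys f false) := by
  rw [PySem.List.sorted_eq_foldl_insertBy, List.foldl_append, ← PySem.List.sorted_eq_foldl_insertBy]
  rfl

theorem sorted_cons_min (f : String → Int) :
    ∀ (ks : List String) (m : String), ks.Nodup → PySem.List.min? ks f = some m →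
    PySem.List.sorted ks f false = m :: PySem.List.sorted (ks.erase m) f false := by
  intro ks
  induction ks using List.reverseRecOn with
  | nil => intro m _ hm; rw [(PySem.List.min?_eq_none_iff [] f).mpr rfl] at hm; cases hm
  | append_singleton ys x ih =>
    intro m hnd hm
    have hndy : ys.Nodup := (List.nodup_append.mp hnd).1
    have hxy : x ∉ ys := by
      intro hx
      rcases List.nodup_append.mp hnd with ⟨_, _, hdisj⟩
      exact hdisj x hx x (List.mem_singleton_self x) rfl
    rw [min?_append_singleton] at hm
    injection hm with hm
    rw [sorted_append_singleton]
    cases hys : PySem.List.min? ys f with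
    | none =>
      have : ys = [] := (PySem.List.min?_eq_none_iff ys f).mp hys
      subst this
      rw [hys] at hm
      have hm' : x = m := hm
      subst hm'
      simp [PySem.List.sorted, PySem.List.insertBy]
    | some m' =>
      rw [hys] at hm
      have hm' : (if f x < f m' then x else m') = m := hm
      by_cases hlt : f x < f m'
      · rw [if_pos hlt] at hm'
        subst hm'
        have herase : (ys ++ [x]).erase x = ys := by
          rw [List.erase_append_right _ hxy]
          simp
        rw [herase]
        have hysne : ys ≠ [] := fun he => by
          rw [he] at hys
          rw [(PySem.List.min?_eq_none_iff [] f).mpr rfl] at hys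
          cases hys
        cases hs : PySem.List.sorted ys f false with
        | nil => exact absurd ((PySem.List.sorted_eq_nil_iff ys f false).mp hs) hysne
        | cons y0 t =>
          have hy0 : y0 ∈ ys := (PySem.List.mem_sorted ys f false y0).mp (by rw [hs]; simp)
          have hle : f m' ≤ f y0 := PySem.List.min?_isMin hys y0 hy0
          have hxlt : f x < f y0 := lt_of_lt_of_le hlt hle
          simp [PySem.List.insertBy, hxlt]
      · rw [if_neg hlt] at hm'
        subst hm'
        have hm'y : m' ∈ ys := PySem.List.min?_mem hys
        rw [List.erase_append_left _ hm'y]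
        rw [sorted_append_singleton]
        rw [ih m' hndy hys]
        simp [PySem.List.insertBy, hlt]

-- ---- the score dict is the table (k, f k) over the deduplicated dictionary ----
theorem keys_mk_map (f : String → Int) (ks : List String) :
    (PySem.Dict.mk (ks.map (fun k => (k, f k))) : PySem.Dict String Int).keys = ks := by
  simp [PySem.Dict.keys, List.map_map, Function.comp_def]

theorem size_mk_map (f : String → Int) (ks : List String) :
    (PySem.Dict.mk (ks.map (fun k => (k, f k))) : PySem.Dict String Int).size = ks.length := by
  simp [PySem.Dict.size]

theorem getD_mk_map (f : String → Int) (ks : List String) (hnd : ks.Nodup)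
    (k : String) (hk : k ∈ ks) :
    (PySem.Dict.mk (ks.map (fun k => (k, f k))) : PySem.Dict String Int).getD k 0 = f k := by
  have hmem : (k, f k) ∈ (ks.map (fun k => (k, f k))) := List.mem_map_of_mem hk
  have hkeys : (PySem.Dict.mk (ks.map (fun k => (k, f k))) : PySem.Dict String Int).keys.Nodup := by
    rw [keys_mk_map]; exact hnd
  have hget := PySem.Dict.get?_of_mem_items (PySem.Dict.mk (ks.map (fun k => (k, f k)))) hmem hkeys
  simp [PySem.Dict.getD, hget]

theorem erase_mk_map (f : String → Int) (ks : List String) (hnd : ks.Nodup) (u : String) :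
    (PySem.Dict.mk (ks.map (fun k => (k, f k))) : PySem.Dict String Int).erase u
      = PySem.Dict.mk ((ks.erase u).map (fun k => (k, f k))) := by
  unfold PySem.Dict.erase
  congr 1
  rw [List.filter_map, hnd.erase_eq_filter u]
  congr 1

theorem contains_mk_map (f : String → Int) (ks : List String) (w : String) :
    (PySem.Dict.mk (ks.map (fun k => (k, f k))) : PySem.Dict String Int).contains w
      = ks.contains w := by
  simp [PySem.Dict.contains, List.any_map, Function.comp_def, List.any_beq']

theorem insert_mk_map (f : String → Int) (ks : List String) (w : String) :
    (PySem.Dict.mk (ks.map (fun k => (k, f k))) : PySem.Dict String Int).insert w (f w)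
      = PySem.Dict.mk ((PySem.Set.add ks w).map (fun k => (k, f k))) := by
  unfold PySem.Dict.insert PySem.Set.add PySem.Set.contains
  rw [contains_mk_map]
  by_cases hw : ks.contains w = true
  · rw [if_pos hw, if_pos hw]
    congr 1
    show List.map _ (List.map _ ks) = _
    rw [List.map_map]
    apply List.map_congr_left
    intro k hk
    by_cases hkw : k = w
    · subst hkw; simp
    · simp [Function.comp, hkw]
  · rw [if_neg hw, if_neg hw]
    congr 1
    simp

theorem build_dict (cl pl : List String) (dictionary : List String) :
    dictionary.foldl (fun d word => d.insert word (pyScoreA word cl pl)) PySem.Dict.empty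
      = PySem.Dict.mk ((PySem.List.dedup dictionary).map (fun k => (k, pyScoreA k cl pl))) := by
  have H : ∀ (l ks : List String),
      l.foldl (fun d word => d.insert word (pyScoreA word cl pl))
          (PySem.Dict.mk (ks.map (fun k => (k, pyScoreA k cl pl))))
        = PySem.Dict.mk ((PySem.Set.update ks l).map (fun k => (k, pyScoreA k cl pl))) := by
    intro l
    induction l with
    | nil => intro ks; rw [List.foldl_nil, PySem.Set.update_nil]
    | cons x t ih =>
      intro ks
      rw [List.foldl_cons, insert_mk_map (fun k => pyScoreA k cl pl) ks x, ih, PySem.Set.update_cons]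
  have h0 := H dictionary []
  rw [PySem.Set.update_nil_left] at h0
  rw [PySem.List.dedup_eq_ofList]
  exact h0

-- ---- A's loop on the key list alone, and B's scan ----
def loopK (f : String → Int) : Nat → List String → String → String
  | 0, _, u => u
  | fuel + 1, ks, u =>
    if checkMultipleLetters u && decide (ks.length > 1) then
      match PySem.List.min? (ks.erase u) f with
      | some u' => loopK f fuel (ks.erase u) u'
      | none => u
    else u

def scanB (s : List String) : String :=
  match s.find? allUnique with
  | some w => w
  | none => s.getLast?.getD ""

theorem loopA_eq_loopK (f : String → Int) :
    ∀ (fuel : Nat) (ks : List String) (u : String), ks.Nodup →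
    pyLoopA fuel (PySem.Dict.mk (ks.map (fun k => (k, f k)))) u = loopK f fuel ks u := by
  intro fuel
  induction fuel with
  | zero => intros; rfl
  | succ fuel ih =>
    intro ks u hnd
    simp only [pyLoopA, loopK, size_mk_map]
    by_cases hc : (checkMultipleLetters u && decide (ks.length > 1)) = true
    · rw [if_pos hc, if_pos hc]
      have hnd' : (ks.erase u).Nodup := hnd.erase u
      rw [erase_mk_map f ks hnd u, keys_mk_map]
      have hmin : PySem.List.min? (ks.erase u)
          (fun k => (PySem.Dict.mk ((ks.erase u).map (fun k => (k, f k))) : PySem.Dict String Int).getD k 0)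
          = PySem.List.min? (ks.erase u) f :=
        min?_congr _ f (ks.erase u) (fun x hx => getD_mk_map f (ks.erase u) hnd' x hx)
      rw [hmin]
      cases hm : PySem.List.min? (ks.erase u) f with
      | none => rfl
      | some u' => exact ih (ks.erase u) u' hnd'
    · rw [if_neg hc, if_neg hc]

theorem scanB_cons_bad (u : String) (t : List String) (hu : allUnique u = false) (ht : t ≠ []) :
    scanB (u :: t) = scanB t := by
  unfold scanB
  rw [List.find?_cons_of_neg (by simp [hu])]
  cases hf : t.find? allUnique with
  | some w => rfl
  | none =>
    simp only
    rw [List.getLast?_cons]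
    cases hl : t.getLast? with
    | none => exact absurd (List.getLast?_eq_none_iff.mp hl) ht
    | some w => rfl

theorem loopK_eq_scanB (f : String → Int) :
    ∀ (fuel : Nat) (ks : List String) (u : String), ks.length = fuel → ks.Nodup →
    PySem.List.min? ks f = some u →
    loopK f fuel ks u = scanB (PySem.List.sorted ks f false) := by
  intro fuel
  induction fuel with
  | zero =>
    intro ks u hlen _ hmin
    rw [List.length_eq_zero_iff.mp hlen] at hmin
    rw [(PySem.List.min?_eq_none_iff [] f).mpr rfl] at hmin
    cases hmin
  | succ fuel ih =>
    intro ks u hlen hnd hmin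
    have hsorted := sorted_cons_min f ks u hnd hmin
    rw [loopK, hsorted]
    by_cases hgood : allUnique u = true
    · have hch : checkMultipleLetters u = false := by rw [check_allUnique, hgood]; rfl
      rw [hch]
      simp only [Bool.false_and, if_neg Bool.false_ne_true]
      unfold scanB
      rw [List.find?_cons_of_pos hgood]
    · have hbad : allUnique u = false := by simpa using hgood
      have hch : checkMultipleLetters u = true := by rw [check_allUnique, hbad]; rfl
      rw [hch]
      by_cases hlen1 : ks.length > 1
      · rw [if_pos (by simp [hlen1])]
        have hmem : u ∈ ks := PySem.List.min?_mem hmin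
        have hlen' : (ks.erase u).length = fuel := by
          rw [List.length_erase_of_mem hmem]; omega
        have hne : ks.erase u ≠ [] := by
          intro he
          have hl := List.length_erase_of_mem hmem
          rw [he] at hl
          simp at hl
          omega
        have hnd' : (ks.erase u).Nodup := hnd.erase u
        cases hm' : PySem.List.min? (ks.erase u) f with
        | none => exact absurd ((PySem.List.min?_eq_none_iff _ f).mp hm') hne
        | some u' =>
          show loopK f fuel (ks.erase u) u' = _
          rw [ih (ks.erase u) u' hlen' hnd' hm']
          rw [scanB_cons_bad u _ hbad]
          intro hs
          exact hne ((PySem.List.sorted_eq_nil_iff _ f false).mp hs)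
      · rw [if_neg (by simp [hlen1])]
        have hmem : u ∈ ks := PySem.List.min?_mem hmin
        have hks : ks = [u] := by
          have h1 : ks.length = 1 := by omega
          rcases List.length_eq_one_iff.mp h1 with ⟨a, ha⟩
          rw [ha] at hmem
          simp at hmem
          rw [ha, hmem]
        subst hks
        have h0 : PySem.List.sorted (List.erase [u] u) f false = [] :=
          (PySem.List.sorted_eq_nil_iff _ f false).mpr (by simp)
        rw [h0]
        simp [scanB, List.find?, hbad]

-- ===== VERDICT (by name: the statement is the Claim_ definition above) =====
theorem mostUniqueWord_spec : Claim_equal_mostUniqueWord := by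
  unfold Claim_equal_mostUniqueWord
  intro dictionary cl pl _ hpre
  unfold Spec_mostUniqueWord
  have hfun : scoreB cl pl (PySem.Set.ofList cl) = fun k => pyScoreA k cl pl :=
    funext (fun w => (scoreA_eq_scoreB w cl pl).symm)
  have hnd : (PySem.List.dedup dictionary).Nodup := PySem.List.nodup_dedup dictionary
  have hne : PySem.List.dedup dictionary ≠ [] := by
    cases dictionary with
    | nil => exact absurd rfl hpre
    | cons x t =>
      exact List.ne_nil_of_mem ((PySem.List.mem_dedup (x :: t) x).mpr (by simp))
  have hB : mostUniqueWord_alt dictionary cl pl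
      = scanB (PySem.List.sorted (PySem.List.dedup dictionary) (fun k => pyScoreA k cl pl) false) := by
    unfold mostUniqueWord_alt scanB
    simp only [hfun]
  rw [hB]
  unfold mostUniqueWord
  simp only [build_dict cl pl dictionary, keys_mk_map, size_mk_map]
  have hminc : PySem.List.min? (PySem.List.dedup dictionary)
      (fun k => (PySem.Dict.mk ((PySem.List.dedup dictionary).map (fun k => (k, pyScoreA k cl pl))) : PySem.Dict String Int).getD k 0)
      = PySem.List.min? (PySem.List.dedup dictionary) (fun k => pyScoreA k cl pl) :=
    min?_congr _ _ (PySem.List.dedup dictionary)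
      (fun x hx => getD_mk_map (fun k => pyScoreA k cl pl) (PySem.List.dedup dictionary) hnd x hx)
  rw [hminc]
  cases hmin : PySem.List.min? (PySem.List.dedup dictionary) (fun k => pyScoreA k cl pl) with
  | none => exact absurd ((PySem.List.min?_eq_none_iff _ _).mp hmin) hne
  | some u =>
    show pyLoopA (PySem.List.dedup dictionary).length
        (PySem.Dict.mk ((PySem.List.dedup dictionary).map (fun k => (k, pyScoreA k cl pl)))) u = _
    rw [loopA_eq_loopK (fun k => pyScoreA k cl pl) (PySem.List.dedup dictionary).length
        (PySem.List.dedup dictionary) u hnd]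
    exact loopK_eq_scanB (fun k => pyScoreA k cl pl) (PySem.List.dedup dictionary).length
        (PySem.List.dedup dictionary) u rfl hnd hmin
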